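-- pv_equiv track=rewrite | github.com/Mark-Andre17/tasks_hw1 | main.py | bananas_2
-- ===== SOURCE A (Python) =====
-- from itertools import product, combinations
--
-- def bananas_2(s) -> set:
--     result = set()
--     word = 'banana'
--     for combo in combinations(range(len(s)), len(s) - len(word)):
--         list_s = list(s)
--         for index in combo:
--             list_s[index] = '-'
--         option = ''.join(list_s)
--         if option.replace('-', '') == word:
--             result.add(option)
--     return result
-- ===== SOURCE B (Python) =====
-- def bananas_2(s) -> set:
--     # DFS over subsequence matches of 'banana'; everything not matched becomes '-'.
--     word = 'banana'
--     n = len(s)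
--     result = set()
--
--     def go(start, j, prefix):
--         if j == len(word):
--             result.add(prefix + '-' * (n - start))
--             return
--         for i in range(n - 1, start - 1, -1):
--             if s[i] == word[j]:
--                 go(i + 1, j + 1, prefix + '-' * (i - start) + s[i])
--
--     go(0, 0, '')
--     return result
-- ===== Notes on version B (the rewrite author's own statement) =====
-- stated objective: faster
-- what changed: Instead of enumerating every (len(s)-6)-subset of positions to dash and testing each candidate string, B backtracks over the subsequence matches of 'banana' in s and emits each valid masking directly, so only (partial) matches are ever visited.
-- crash fix: On strings shorter than 6 characters A raises ValueError (combinations with negative r); B returns the empty set. — e.g. on bananas_2(""): A raises ValueError, B returns []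
import Mathlib
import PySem

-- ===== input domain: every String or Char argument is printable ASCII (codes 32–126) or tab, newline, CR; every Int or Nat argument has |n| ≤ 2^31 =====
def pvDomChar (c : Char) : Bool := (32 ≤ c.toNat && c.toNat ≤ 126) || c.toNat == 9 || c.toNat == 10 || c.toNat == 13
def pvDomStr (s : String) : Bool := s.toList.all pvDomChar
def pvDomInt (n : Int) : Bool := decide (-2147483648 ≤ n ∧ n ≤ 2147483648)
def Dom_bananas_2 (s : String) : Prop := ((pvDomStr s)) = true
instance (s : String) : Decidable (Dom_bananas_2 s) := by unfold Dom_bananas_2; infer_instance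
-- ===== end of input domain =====

-- B replaces A's exhaustive enumeration of all dash-position subsets by a backtracking search
-- over the subsequence matches of "banana" (objective: faster, measured).

-- ===== PORT A =====

-- itertools.combinations(l, k) in lexicographic order (hand port, exact for k = len(s)-6 ≥ 0).
def pyCombinations : List Int → Nat → List (List Int)
  | _, 0 => [[]]
  | [], _ + 1 => []
  | x :: xs, k + 1 => ((pyCombinations xs k).map (x :: ·)) ++ pyCombinations xs (k + 1)
def bananas_2 (s : String) : List String :=
  (pyCombinations (PySem.List.pyRange 0 (PySem.Str.len s) 1)
      (PySem.Str.len s - PySem.Str.len "banana").toNat).foldl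
    (fun result combo =>
      let list_s := combo.foldl (fun ls index => PySem.List.pySetD ls index '-') s.toList
      let option := String.ofList list_s
      if PySem.Str.replace option "-" "" = "banana" then PySem.Set.add result option else result)
    PySem.Set.empty


-- ===== PORT B =====

-- go(start, j, pref): the still-unmatched suffix of the word stands for j; pref is the mask
-- built so far as a List Char (Python concatenates 1-char strings); the appended s[i] of the
-- Python equals the matched word character c.
def goB (cs : List Char) : List Char → Int → List Char → PySem.Set String → PySem.Set String
  | [], start, pref, result =>
      PySem.Set.add result
        (String.ofList (pref ++ List.replicate ((cs.length : Int) - start).toNat '-'))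
  | c :: wrest, start, pref, result =>
      (PySem.List.pyRange ((cs.length : Int) - 1) (start - 1) (-1)).foldl
        (fun res i =>
          if PySem.List.pyGetD cs i ' ' = c then
            goB cs wrest (i + 1) (pref ++ List.replicate (i - start).toNat '-' ++ [c]) res
          else res)
        result

def bananas_2_alt (s : String) : List String :=
  goB s.toList "banana".toList 0 [] PySem.Set.empty


-- ===== PRECONDITION & SPEC =====
-- Pre_ excludes exactly the strings shorter than the word "banana", on which Python A raises
-- ValueError (combinations with negative r); A returns normally everywhere else.
def Pre_bananas_2 (s : String) : Prop := "banana".toList.length ≤ s.toList.length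
instance (s : String) : Decidable (Pre_bananas_2 s) := by unfold Pre_bananas_2; infer_instance
def pvWitness_bananas_2 : String := "banana"

-- On strings shorter than 6 characters A raises ValueError; B returns the empty set.
def Raises_bananas_2 (s : String) : Prop := s.toList.length < 6
instance (s : String) : Decidable (Raises_bananas_2 s) := by unfold Raises_bananas_2; infer_instance
def pvRaiseWitness_bananas_2 : String := ""
def pvRaiseWitnessOut_bananas_2 : List String := []

def Spec_bananas_2 (s : String) (out : List String) : Prop := out = bananas_2_alt s
instance (s : String) (out : List String) : Decidable (Spec_bananas_2 s out) := by unfold Spec_bananas_2; infer_instance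

-- ===== CLAIM (what is proved, stated in full; the proofs are below) =====
def Claim_equal_bananas_2 : Prop := ∀ (s : String), Dom_bananas_2 s → Pre_bananas_2 s → Spec_bananas_2 s (bananas_2 s)
def Claim_raises_bananas_2 : Prop := (∀ (s : String), Dom_bananas_2 s → Raises_bananas_2 s → ¬ Pre_bananas_2 s) ∧ (Dom_bananas_2 (pvRaiseWitness_bananas_2) ∧ Raises_bananas_2 (pvRaiseWitness_bananas_2) ∧ bananas_2_alt (pvRaiseWitness_bananas_2) = pvRaiseWitnessOut_bananas_2)

-- ===== LEMMAS AND PROOFS =====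

def combN {α : Type} : List α → Nat → List (List α)
  | _, 0 => [[]]
  | [], _ + 1 => []
  | x :: xs, k + 1 => ((combN xs k).map (x :: ·)) ++ combN xs (k + 1)

theorem pyComb_eq_combN : ∀ (l : List Int) (k : Nat), pyCombinations l k = combN l k := by
  intro l
  induction l with
  | nil => intro k; cases k <;> rfl
  | cons x xs ih => intro k; cases k with
    | zero => rfl
    | succ k => simp [pyCombinations, combN, ih]

theorem combN_map {α β : Type} (f : α → β) :
    ∀ (l : List α) (k : Nat), combN (l.map f) k = (combN l k).map (List.map f) := by
  intro l
  induction l with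
  | nil => intro k; cases k <;> rfl
  | cons x xs ih => intro k; cases k with
    | zero => rfl
    | succ k => simp [combN, ih]

theorem combN_nil_of_lt {α : Type} : ∀ (l : List α) (k : Nat), l.length < k → combN l k = [] := by
  intro l
  induction l with
  | nil => intro k h; cases k with
    | zero => omega
    | succ k => rfl
  | cons x xs ih => intro k h; cases k with
    | zero => omega
    | succ k =>
      simp at h
      simp [combN, ih k (by omega), ih (k+1) (by omega)]

def maskOf (cs : List Char) (D : List Nat) : List Char :=
  D.foldl (fun ls i => ls.set i '-') cs

theorem maskOf_map_succ : ∀ (D : List Nat) (cs : List Char) (c : Char),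
    maskOf (c :: cs) (D.map (· + 1)) = c :: maskOf cs D := by
  intro D
  induction D with
  | nil => intro cs c; rfl
  | cons d D ih => intro cs c; simp [maskOf, List.foldl_cons] at *; exact ih _ _

theorem maskOf_cast : ∀ (D : List Nat) (cs : List Char),
    List.foldl (fun ls index => PySem.List.pySetD ls index '-') cs (List.map (fun k : Nat => (k : Int)) D) = maskOf cs D := by
  intro D
  induction D with
  | nil => intro cs; rfl
  | cons d D ih => intro cs; simp [maskOf, List.foldl_cons, PySem.List.pySetD_natCast] at *; exact ih _


def mlist (cs : List Char) (d : Nat) : List (List Char) :=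
  (combN (List.range cs.length) d).map (maskOf cs)

theorem mlist_cons (c : Char) (cs : List Char) (d : Nat) :
    mlist (c :: cs) d =
      (match d with
        | 0 => []
        | d' + 1 => (mlist cs d').map ('-' :: ·)) ++ (mlist cs d).map (c :: ·) := by
  cases d with
  | zero => simp [mlist, combN, maskOf]
  | succ d' =>
    show mlist (c :: cs) (d' + 1) = (mlist cs d').map ('-' :: ·) ++ (mlist cs (d'+1)).map (c :: ·)
    unfold mlist
    have hr : List.range (c :: cs).length = 0 :: (List.range cs.length).map (· + 1) := by
      simp [List.range_succ_eq_map, Nat.succ_eq_add_one]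
    rw [hr]
    show ((combN ((List.range cs.length).map (· + 1)) d').map (0 :: ·) ++
        combN ((List.range cs.length).map (· + 1)) (d' + 1)).map (maskOf (c :: cs)) = _
    rw [combN_map, combN_map]
    simp only [List.map_append, List.map_map]
    congr 1
    · apply List.map_congr_left; intro D _
      show maskOf (c :: cs) (0 :: D.map (· + 1)) = '-' :: maskOf cs D
      have h0 : maskOf (c :: cs) (0 :: D.map (· + 1)) = maskOf ('-' :: cs) (D.map (· + 1)) := by
        simp [maskOf]
      rw [h0, maskOf_map_succ]
    · apply List.map_congr_left; intro D _
      exact maskOf_map_succ D cs c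

theorem mlist_filter_len : ∀ (cs : List Char) (d : Nat) (m : List Char), m ∈ mlist cs d →
    (m.filter (· ≠ '-')).length + d ≤ cs.length := by
  intro cs
  induction cs with
  | nil =>
    intro d m hm
    cases d with
    | zero => simp [mlist, combN, maskOf] at hm; simp [hm]
    | succ d => simp [mlist, combN] at hm
  | cons c cs ih =>
    intro d m hm
    rw [mlist_cons] at hm
    rcases List.mem_append.mp hm with h | h
    · cases d with
      | zero => simp at h
      | succ d' =>
        rcases List.mem_map.mp h with ⟨m', hm', rfl⟩
        have := ih d' m' hm'
        simp [List.filter_cons, ne_eq] at this ⊢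
        omega
    · rcases List.mem_map.mp h with ⟨m', hm', rfl⟩
      have := ih d m' hm'
      simp [List.filter_cons, ne_eq] at this ⊢
      by_cases hc : c = '-' <;> simp [hc] <;> omega

def descL : List Char → List Char → List (List Char)
  | cs, [] => [List.replicate cs.length '-']
  | [], _ :: _ => []
  | x :: cs, c :: w =>
      (descL cs (c :: w)).map ('-' :: ·) ++
        (if x = c then (descL cs w).map (x :: ·) else [])

theorem descL_nil_of_lt : ∀ (cs w : List Char), cs.length < w.length → descL cs w = [] := by
  intro cs
  induction cs with
  | nil => intro w h; cases w with
    | nil => simp at h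
    | cons a w => rfl
  | cons x cs ih =>
    intro w h
    cases w with
    | nil => simp at h
    | cons a w =>
      simp at h
      rw [descL, ih (a :: w) (by simp; omega), ih w (by omega)]
      simp

theorem replace_go_filter : ∀ (fuel : Nat) (l acc : List Char), l.length ≤ fuel →
    PySem.Chars.replace.go ['-'] [] fuel l acc = acc.reverse ++ l.filter (· ≠ '-') := by
  intro fuel
  induction fuel with
  | zero =>
    intro l acc h
    have hl : l = [] := by cases l <;> simp_all
    subst hl; rw [PySem.Chars.replace.go.eq_def]; simp
  | succ fuel ih =>
    intro l acc h
    cases l with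
    | nil => rw [PySem.Chars.replace.go.eq_def]; simp
    | cons c t =>
      rw [PySem.Chars.replace.go.eq_def]
      by_cases hc : c = '-'
      · subst hc
        have hp : List.isPrefixOf ['-'] ('-' :: t) = true := by simp [List.isPrefixOf]
        simp only [hp, if_pos]
        rw [ih _ _ (by simpa using h)]
        simp [List.filter_cons]
      · have hp : List.isPrefixOf ['-'] (c :: t) = false := by
          simp [List.isPrefixOf]; exact fun he => hc he.symm
        simp only [hp, Bool.false_eq_true, if_false]
        rw [ih t (c :: acc) (by simpa using h)]
        simp [List.filter_cons, hc]

theorem replace_dash (m : List Char) :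
    PySem.Chars.replace m ['-'] [] = m.filter (· ≠ '-') := by
  rw [PySem.Chars.replace]
  simp [replace_go_filter m.length m [] (le_refl _)]


theorem fv_nil_of_lt (cs : List Char) (d : Nat) (w : List Char) (h : cs.length < d + w.length) :
    (mlist cs d).filter (fun m => decide (m.filter (· ≠ '-') = w)) = [] := by
  rw [List.filter_eq_nil_iff]
  intro m hm
  have hl := mlist_filter_len cs d m hm
  simp only [decide_eq_true_eq]
  intro he
  rw [he] at hl
  omega

theorem main_corr : ∀ (cs : List Char) (d : Nat) (w : List Char),
    d + w.length = cs.length → '-' ∉ w →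
    (mlist cs d).filter (fun m => decide (m.filter (· ≠ '-') = w)) = descL cs w := by
  intro cs
  induction cs with
  | nil =>
    intro d w hlen hw
    simp at hlen
    obtain ⟨hd, hwn⟩ := hlen
    subst hd; subst hwn
    simp [mlist, combN, maskOf, descL]
  | cons c cs ih =>
    intro d w hlen hw
    cases w with
    | nil =>
      have hd : d = cs.length + 1 := by simpa using hlen
      subst hd
      rw [mlist_cons]
      have h2 : mlist cs (cs.length + 1) = [] := by
        unfold mlist; rw [combN_nil_of_lt _ _ (by simp)]; rfl
      rw [h2]
      simp only [List.append_nil, List.map_nil, List.filter_map]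
      have hc1 : (mlist cs cs.length).filter
            ((fun m => decide (m.filter (· ≠ '-') = ([] : List Char))) ∘ ('-' :: ·)) =
          (mlist cs cs.length).filter (fun m => decide (m.filter (· ≠ '-') = ([] : List Char))) := by
        apply List.filter_congr; intro m _
        have hstep : List.filter (· ≠ '-') ('-' :: m) = List.filter (· ≠ '-') m := by
          rw [List.filter_cons]
          norm_num
        simp only [Function.comp_apply, hstep]
      rw [hc1, ih cs.length [] (by simp) (by simp)]
      simp [descL, List.replicate_succ]
    | cons a w' =>
      have ha : a ≠ '-' := by intro he; exact hw (by simp [he])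
      have hw' : '-' ∉ w' := fun hm => hw (by simp [hm])
      cases d with
      | zero =>
        rw [mlist_cons]
        have h0 : mlist cs 0 = [cs] := by simp [mlist, combN, maskOf]
        rw [h0]
        have hcs : cs.length = w'.length := by simp at hlen; omega
        have hdn : descL cs (a :: w') = [] := descL_nil_of_lt cs (a :: w') (by simp [hcs])
        rw [descL, hdn]
        simp only [List.nil_append, List.map_cons, List.map_nil]
        by_cases hcd : c = '-'
        · subst hcd
          have hP : List.filter (· ≠ '-') ('-' :: cs) ≠ a :: w' := by
            intro he
            have h1 := congrArg List.length he
            have h2 := List.length_filter_le (fun x => decide (x ≠ '-')) cs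
            rw [List.filter_cons] at h1
            simp at h1 h2
            omega
          have hca : ¬ ('-' = a) := fun he => ha (Eq.symm he)
          have hP2 : ¬ List.filter (fun x => !decide (x = '-')) cs = a :: w' := by
            simpa [List.filter_cons] using hP
          simp [hca, hP2]
        · by_cases hca : c = a
          · subst hca
            have hih := ih 0 w' (by simp at hlen ⊢; omega) hw'
            rw [h0] at hih
            rw [if_pos rfl, ← hih]
            simp only [List.filter_cons, List.filter_nil, hcd, ne_eq, decide_not,
              decide_false, Bool.not_false, if_pos, List.cons.injEq]
            split <;> simp_all
          · have hP : List.filter (· ≠ '-') (c :: cs) ≠ a :: w' := by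
              rw [List.filter_cons]
              simp [hcd, hca]
            have hP2 : ¬ List.filter (fun x => !decide (x = '-')) (c :: cs) = a :: w' := by
              simpa using hP
            simp [hP2, hca]
      | succ d' =>
        rw [mlist_cons]
        simp only [List.filter_append, List.filter_map]
        rw [descL]
        have hb1 : (mlist cs d').filter
              ((fun m => decide (m.filter (· ≠ '-') = a :: w')) ∘ ('-' :: ·)) =
            (mlist cs d').filter (fun m => decide (m.filter (· ≠ '-') = a :: w')) := by
          apply List.filter_congr; intro m _
          simp [List.filter_cons]
        rw [hb1, ih d' (a :: w') (by simp at hlen ⊢; omega) hw]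
        congr 1
        by_cases hcd : c = '-'
        · subst hcd
          have hb2 : (mlist cs (d' + 1)).filter
                ((fun m => decide (m.filter (· ≠ '-') = a :: w')) ∘ ('-' :: ·)) =
              (mlist cs (d' + 1)).filter (fun m => decide (m.filter (· ≠ '-') = a :: w')) := by
            apply List.filter_congr; intro m _
            have hstep : List.filter (· ≠ '-') ('-' :: m) = List.filter (· ≠ '-') m := by
              rw [List.filter_cons]
              norm_num
            simp only [Function.comp_apply, hstep]
          rw [hb2, fv_nil_of_lt cs (d' + 1) (a :: w')
            (by simp only [List.length_cons] at hlen ⊢; omega)]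
          rw [if_neg (fun he => ha (Eq.symm he))]
          rfl
        · by_cases hca : c = a
          · subst hca
            rw [if_pos rfl]
            have hb3 : (mlist cs (d' + 1)).filter
                  ((fun m => decide (m.filter (· ≠ '-') = c :: w')) ∘ (c :: ·)) =
                (mlist cs (d' + 1)).filter (fun m => decide (m.filter (· ≠ '-') = w')) := by
              apply List.filter_congr; intro m _
              have hstep : List.filter (· ≠ '-') (c :: m) = c :: List.filter (· ≠ '-') m := by
                rw [List.filter_cons]
                simp [hcd]
              simp only [Function.comp_apply, hstep, List.cons.injEq, true_and]
            rw [hb3, ih (d' + 1) w' (by simp only [List.length_cons] at hlen ⊢; omega) hw']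
          · rw [if_neg hca]
            have hb4 : (mlist cs (d' + 1)).filter
                  ((fun m => decide (m.filter (· ≠ '-') = a :: w')) ∘ (c :: ·)) = [] := by
              rw [List.filter_eq_nil_iff]
              intro m _
              simp only [Function.comp_apply, List.filter_cons, decide_eq_true_eq]
              intro he
              rw [if_pos (by simpa using hcd)] at he
              exact hca (List.cons.injEq .. ▸ he |>.1)
            rw [hb4]
            rfl


theorem cond_iff (m : List Char) :
    (PySem.Str.replace (String.ofList m) "-" "" = "banana") ↔
      (m.filter (· ≠ '-') = "banana".toList) := by
  rw [← String.toList_inj, PySem.Str.toList_replace]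
  simp [replace_dash]

theorem A_fold (cs w : List Char) : ∀ (L : List (List Nat)) (acc : PySem.Set String),
    L.foldl (fun r D => if (maskOf cs D).filter (· ≠ '-') = w
        then PySem.Set.add r (String.ofList (maskOf cs D)) else r) acc
    = ((L.map (maskOf cs)).filter (fun m => decide (m.filter (· ≠ '-') = w))).foldl
        (fun r m => PySem.Set.add r (String.ofList m)) acc := by
  intro L
  induction L with
  | nil => intro acc; rfl
  | cons D L ih =>
    intro acc
    by_cases h : (maskOf cs D).filter (· ≠ '-') = w
    · simp only [List.foldl_cons, List.map_cons, List.filter_cons, if_pos h, h, decide_true,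
        if_true]
      exact ih _
    · have hb : decide ((maskOf cs D).filter (· ≠ '-') = w) = false := decide_eq_false h
      simp only [List.foldl_cons, List.map_cons, List.filter_cons, if_neg h, hb,
        Bool.false_eq_true, if_false]
      exact ih _

theorem A_norm (s : String) (h : 6 ≤ s.toList.length) :
    bananas_2 s = (descL s.toList "banana".toList).foldl
      (fun r m => PySem.Set.add r (String.ofList m)) PySem.Set.empty := by
  unfold bananas_2
  simp only [PySem.Str.len_eq]
  have hw6 : ("banana".toList.length : Int) = 6 := by decide
  rw [hw6]
  have hd : ((s.toList.length : Int) - 6).toNat = s.toList.length - 6 := by omega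
  rw [hd, PySem.List.pyRange_zero_nat, pyComb_eq_combN, combN_map, List.foldl_map]
  refine Eq.trans (PySem.List.foldl_congr_mem _ _
    (fun x y => if (maskOf s.toList y).filter (· ≠ '-') = "banana".toList
      then PySem.Set.add x (String.ofList (maskOf s.toList y)) else x) _ ?_) ?_
  · intro acc x hx
    simp only [cond_iff]
    rw [maskOf_cast x s.toList]
  · rw [A_fold]
    have hm : (combN (List.range s.toList.length) (s.toList.length - 6)).map (maskOf s.toList) =
        mlist s.toList (s.toList.length - 6) := rfl
    rw [hm, main_corr s.toList (s.toList.length - 6) "banana".toList (by simp at h ⊢; omega) (by decide)]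


theorem B_norm_aux (cs : List Char) : ∀ (w : List Char) (start : Nat), start ≤ cs.length →
    ∀ (pref : List Char) (res : PySem.Set String),
    goB cs w (start : Int) pref res =
      (descL (cs.drop start) w).foldl
        (fun r m => PySem.Set.add r (String.ofList (pref ++ m))) res := by
  intro w
  induction w with
  | nil =>
    intro start hs pref res
    rw [goB, descL]
    have ht : ((cs.length : Int) - (start : Int)).toNat = cs.length - start := by omega
    simp [ht]
  | cons c wrest ihw =>
    have H : ∀ (k start : Nat), start ≤ cs.length → cs.length - start ≤ k →
        ∀ (pref : List Char) (res : PySem.Set String),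
        goB cs (c :: wrest) (start : Int) pref res =
          (descL (cs.drop start) (c :: wrest)).foldl
            (fun r m => PySem.Set.add r (String.ofList (pref ++ m))) res := by
      intro k
      induction k with
      | zero =>
        intro start hs hk pref res
        have hse : start = cs.length := by omega
        subst hse
        rw [goB, PySem.List.pyRange_neg_one_eq_nil (by omega), List.drop_length]
        rfl
      | succ k ihk =>
        intro start hs hk pref res
        by_cases hse : start = cs.length
        · subst hse
          rw [goB, PySem.List.pyRange_neg_one_eq_nil (by omega), List.drop_length]
          rfl
        · have hlt : start < cs.length := by omega
          rw [goB]
          have hsplit : PySem.List.pyRange ((cs.length : Int) - 1) ((start : Int) - 1) (-1) =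
              PySem.List.pyRange ((cs.length : Int) - 1) (start : Int) (-1) ++ [(start : Int)] := by
            rw [PySem.List.pyRange_neg_one_eq_reverse, PySem.List.pyRange_neg_one_eq_reverse]
            rw [show ((start : Int) - 1 + 1) = (start : Int) by ring]
            rw [PySem.List.pyRange_one_cons (by omega)]
            simp
          rw [hsplit, List.foldl_append]
          simp only [List.foldl_cons, List.foldl_nil]
          have hfirst : List.foldl
              (fun res i => if PySem.List.pyGetD cs i ' ' = c then
                goB cs wrest (i + 1) (pref ++ List.replicate (i - (start : Int)).toNat '-' ++ [c]) res
                else res) res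
              (PySem.List.pyRange ((cs.length : Int) - 1) (start : Int) (-1))
              = goB cs (c :: wrest) ((start + 1 : Nat) : Int) (pref ++ ['-']) res := by
            rw [goB]
            rw [show (((start + 1 : Nat) : Int) - 1) = (start : Int) by push_cast; ring]
            apply Eq.symm
            apply PySem.List.foldl_congr_mem
            intro acc i hi
            rw [PySem.List.mem_pyRange_neg_one] at hi
            have h2 : pref ++ ['-'] ++ List.replicate (i - ((start + 1 : Nat) : Int)).toNat '-' =
                pref ++ List.replicate (i - (start : Int)).toNat '-' := by
              have h1 : (i - (start : Int)).toNat = (i - ((start + 1 : Nat) : Int)).toNat + 1 := by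
                push_cast; omega
              rw [h1, List.replicate_succ]
              simp
            rw [h2]
          rw [hfirst, ihk (start + 1) (by omega) (by omega) (pref ++ ['-']) res]
          have hdrop : cs.drop start = cs[start] :: cs.drop (start + 1) := by
            exact (List.getElem_cons_drop (as := cs) hlt).symm
          rw [hdrop, descL, List.foldl_append]
          have hget : PySem.List.pyGetD cs (start : Int) ' ' = cs[start] := by
            rw [PySem.List.pyGetD_of_nonneg cs ' ' (by omega)]
            simp [List.getD_eq_getElem?_getD, List.getElem?_eq_getElem hlt]
          have hmap1 : ∀ (X : List (List Char)) (r0 : PySem.Set String),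
              (X.map ('-' :: ·)).foldl (fun r m => PySem.Set.add r (String.ofList (pref ++ m))) r0 =
              X.foldl (fun r m => PySem.Set.add r (String.ofList ((pref ++ ['-']) ++ m))) r0 := by
            intro X r0
            rw [List.foldl_map]
            apply PySem.List.foldl_congr_mem
            intro acc m _
            simp
          rw [hmap1]
          by_cases hc : cs[start] = c
          · rw [if_pos (by rw [hget]; exact hc), if_pos hc]
            have ht0 : ((start : Int) - (start : Int)).toNat = 0 := by omega
            rw [ht0]
            simp only [List.replicate_zero, List.append_nil]
            rw [show ((start : Int) + 1) = ((start + 1 : Nat) : Int) by push_cast; ring]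
            rw [ihw (start + 1) (by omega) (pref ++ [c])]
            rw [List.foldl_map]
            apply PySem.List.foldl_congr_mem
            intro acc m _
            have : pref ++ [c] ++ m = pref ++ (cs[start] :: m) := by simp [hc]
            rw [this]
          · rw [if_neg (by rw [hget]; exact hc), if_neg hc]
            simp
    intro start hs pref res
    exact H (cs.length - start) start hs (le_refl _) pref res

theorem B_norm (s : String) :
    bananas_2_alt s = (descL s.toList "banana".toList).foldl
      (fun r m => PySem.Set.add r (String.ofList m)) PySem.Set.empty := by
  unfold bananas_2_alt
  have := B_norm_aux s.toList "banana".toList 0 (by omega) [] PySem.Set.empty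
  simp only [Nat.cast_zero, List.drop_zero] at this
  rw [this]
  apply PySem.List.foldl_congr_mem
  intro acc m _
  simp

-- ===== VERDICT (by name: the statement is the Claim_ definition above) =====
theorem bananas_2_spec : Claim_equal_bananas_2 := by
  intro s _ hpre
  unfold Spec_bananas_2
  have h6 : "banana".toList.length = 6 := by decide
  unfold Pre_bananas_2 at hpre
  rw [A_norm s (by omega), B_norm s]

theorem bananas_2_raises : Claim_raises_bananas_2 := by
  unfold Claim_raises_bananas_2
  refine ⟨?_, by decide, by decide, by decide⟩
  intro s _ hr hp
  unfold Pre_bananas_2 at hp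
  unfold Raises_bananas_2 at hr
  have h6 : "banana".toList.length = 6 := by decide
  omega

-- witness self-check (deliberate): the raise-region witness value of B, read off bananas_2_raises
theorem pvRaiseWitnessOut_bananas_2_ok :
    bananas_2_alt pvRaiseWitness_bananas_2 = pvRaiseWitnessOut_bananas_2 := by
  have h := bananas_2_raises
  unfold Claim_raises_bananas_2 at h
  exact h.2.2.2
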